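-- pv_equiv track=rewrite | github.com/ysenoh/programing | codeiq/3460/solve.py | f
-- ===== SOURCE A (Python) =====
-- def combin(n,r):
--     x = 1
--     for i in range(1, r+1):
--         x = x*(n-i+1)//i
--
--     return x
--
-- def f(m, n):
--     # a ... ブレーカー off
--     # b ... ブレーカー on スイッチ両方共on
--     # c ... ブレーカー on スイッチ一方のみon
--     # ブレーカー on スイッチ両方共off は bと等しい
--
--     if m < n:
--         return 0
--
--     a = m - n
--     x = 0
--
--     for b in range(n//2 + 1):
--         c = n - 2*b
--         assert a + 2*b + c == m
--
--         m2 = m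
--         p = 1
--
--         for i in [a, b, c]:
--             p *= combin(m2, i)
--             m2 -= i
--
--         x += p * 2**c
--
--     return 4**a * x
-- ===== SOURCE B (Python) =====
-- def f(m, n):
--     if m < n:
--         return 0
--     a = m - n
--     # running multinomial coefficient, initialised to C(m, n) (the b = 0 term)
--     p = 1
--     for i in range(n):
--         p = p * (m - i) // (i + 1)
--     x = 0
--     for b in range(n // 2 + 1):
--         c = n - 2 * b
--         x += p * 2 ** c
--         # exact integer step to the next multinomial coefficient
--         p = p * c * (c - 1) // ((b + 1) * (b + 1))
--     return 4 ** a * x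
-- ===== Notes on version B (the rewrite author's own statement) =====
-- stated objective: faster
-- what changed: B drops A's inner loop that rebuilds the three-binomial multinomial coefficient from scratch each iteration, maintaining instead a single running coefficient initialised to C(m,n) and advanced by the exact integer recurrence p = p*c*(c-1)//((b+1)^2).
import Mathlib
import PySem

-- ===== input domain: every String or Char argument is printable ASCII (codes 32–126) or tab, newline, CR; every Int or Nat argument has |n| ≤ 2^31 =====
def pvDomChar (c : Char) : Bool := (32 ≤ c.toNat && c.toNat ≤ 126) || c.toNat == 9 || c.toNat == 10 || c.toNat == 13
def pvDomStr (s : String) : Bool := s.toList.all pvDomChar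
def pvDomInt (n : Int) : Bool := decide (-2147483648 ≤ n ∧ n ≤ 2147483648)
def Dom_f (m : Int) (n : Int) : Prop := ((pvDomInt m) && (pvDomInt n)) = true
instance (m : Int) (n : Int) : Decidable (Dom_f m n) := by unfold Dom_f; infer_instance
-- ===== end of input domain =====

-- B replaces A's per-iteration recomputation of three binomial coefficients by one running
-- coefficient updated with an exact integer recurrence (objective: faster, constant factor).

-- ===== PORT A =====
-- helper combin(n, r): iterative binomial coefficient via floor division
def combin (n : Int) (r : Int) : Int :=
  (PySem.List.pyRange 1 (r + 1) 1).foldl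
    (fun x i => PySem.Int.floordiv (x * (n - i + 1)) i) 1

-- 2**c and 4**a are only evaluated with c ≥ 0 and a ≥ 0 (guaranteed by the m < n guard
-- and the loop range), so `(· : Int) ^ (·).toNat` is exact there.
def f (m : Int) (n : Int) : Int :=
  if m < n then 0
  else
    let a := m - n
    let x := (PySem.List.pyRange 0 (PySem.Int.floordiv n 2 + 1) 1).foldl
      (fun x b =>
        let c := n - 2 * b
        let st := [a, b, c].foldl
          (fun (s : Int × Int) i => (s.1 - i, s.2 * combin s.1 i)) (m, 1)
        x + st.2 * 2 ^ c.toNat) 0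
    4 ^ a.toNat * x

-- ===== PORT B =====
def f_alt (m : Int) (n : Int) : Int :=
  if m < n then 0
  else
    let a := m - n
    let p0 := (PySem.List.pyRange 0 n 1).foldl
      (fun p i => PySem.Int.floordiv (p * (m - i)) (i + 1)) 1
    let st := (PySem.List.pyRange 0 (PySem.Int.floordiv n 2 + 1) 1).foldl
      (fun (s : Int × Int) b =>
        let c := n - 2 * b
        (s.1 + s.2 * 2 ^ c.toNat,
         PySem.Int.floordiv (s.2 * c * (c - 1)) ((b + 1) * (b + 1)))) (0, p0)
    4 ^ a.toNat * st.1

-- ===== PRECONDITION & SPEC =====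
def Spec_f (m : Int) (n : Int) (out : Int) : Prop := out = f_alt m n
instance (m : Int) (n : Int) (out : Int) : Decidable (Spec_f m n out) := by unfold Spec_f; infer_instance

-- ===== CLAIM (what is proved, stated in full; the proofs are below) =====
def Claim_equal_f : Prop := ∀ (m : Int) (n : Int), Dom_f m n → Spec_f m n (f m n)

-- ===== LEMMAS AND PROOFS =====

-- exact-division step shared by both iterative coefficient updates
lemma floordiv_mul_cancel (q d : Int) (hd : 0 < d) :
    PySem.Int.floordiv (q * d) d = q := by
  rw [PySem.Int.floordiv_eq_ediv_of_pos hd]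
  exact Int.mul_ediv_cancel q (by omega)

-- one-step binomial recurrence, in ℤ, valid for ALL k (both sides are 0 for k ≥ N)
lemma choose_step (N k : ℕ) :
    (N.choose k : ℤ) * ((N : ℤ) - k) = (N.choose (k + 1) : ℤ) * (k + 1) := by
  by_cases h : k ≤ N
  · have h0 := Nat.choose_succ_right_eq N k
    have hsub : ((N - k : ℕ) : ℤ) = (N : ℤ) - k := by omega
    calc (N.choose k : ℤ) * ((N : ℤ) - k)
        = ((N.choose k * (N - k) : ℕ) : ℤ) := by push_cast [hsub]; ring
      _ = ((N.choose (k + 1) * (k + 1) : ℕ) : ℤ) := by rw [← h0]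
      _ = (N.choose (k + 1) : ℤ) * (k + 1) := by push_cast; ring
  · have h1 : N.choose k = 0 := Nat.choose_eq_zero_of_lt (by omega)
    have h2 : N.choose (k + 1) = 0 := Nat.choose_eq_zero_of_lt (by omega)
    simp [h1, h2]

-- invariant of A's combin loop
lemma combin_aux (N R : ℕ) : ∀ (t k : ℕ), k + t = R →
    (PySem.List.pyRange ((k : ℤ) + 1) ((R : ℤ) + 1) 1).foldl
      (fun x i => PySem.Int.floordiv (x * ((N : ℤ) - i + 1)) i) (N.choose k : ℤ)
    = (N.choose R : ℤ) := by
  intro t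
  induction t with
  | zero =>
    intro k hk
    have hkR : k = R := by omega
    subst hkR
    rw [PySem.List.pyRange_one_eq_nil (by omega)]
    simp
  | succ s ih =>
    intro k hk
    rw [PySem.List.pyRange_one_cons (by omega : ((k:ℤ)+1) < (R:ℤ)+1)]
    simp only [List.foldl_cons]
    have hstep : PySem.Int.floordiv ((N.choose k : ℤ) * ((N : ℤ) - ((k:ℤ)+1) + 1)) ((k:ℤ)+1)
        = (N.choose (k+1) : ℤ) := by
      have heq : (N.choose k : ℤ) * ((N : ℤ) - ((k:ℤ)+1) + 1) = (N.choose (k+1) : ℤ) * ((k:ℤ)+1) := by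
        have h := choose_step N k
        push_cast at h ⊢
        linarith [h]
      rw [heq, floordiv_mul_cancel _ _ (by omega)]
    have hcast : ((k:ℤ)+1) + 1 = ((k+1 : ℕ) : ℤ) + 1 := by push_cast; ring
    rw [hstep, hcast]
    exact ih (k+1) (by omega)

lemma combin_eq (N R : ℕ) : combin (N : ℤ) (R : ℤ) = (N.choose R : ℤ) := by
  unfold combin
  have h := combin_aux N R R 0 (by omega)
  simpa using h

-- B's initialisation loop computes C(M, N)
lemma init_eq (M N : ℕ) (hMN : N ≤ M) : ∀ (t k : ℕ), k + t = N →
    (PySem.List.pyRange (k : ℤ) (N : ℤ) 1).foldl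
      (fun p i => PySem.Int.floordiv (p * ((M : ℤ) - i)) (i + 1)) (M.choose k : ℤ)
    = (M.choose N : ℤ) := by
  intro t
  induction t with
  | zero =>
    intro k hk
    have hkN : k = N := by omega
    subst hkN
    rw [PySem.List.pyRange_one_eq_nil (by omega)]
    simp
  | succ s ih =>
    intro k hk
    rw [PySem.List.pyRange_one_cons (by omega : (k:ℤ) < (N:ℤ))]
    simp only [List.foldl_cons]
    have hstep : PySem.Int.floordiv ((M.choose k : ℤ) * ((M : ℤ) - (k:ℤ))) ((k:ℤ)+1)
        = (M.choose (k+1) : ℤ) := by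
      rw [choose_step M k, floordiv_mul_cancel _ _ (by omega)]
    have hcast : (k:ℤ) + 1 = ((k+1 : ℕ) : ℤ) := by push_cast; ring
    rw [hstep, hcast]
    exact ih (k+1) (by omega)

-- the multinomial recurrence C(n,j)·C(n−j,c)·c·(c−1) = C(n,j+1)·C(n−j−1,c−2)·(j+1)², n = 2j+e+2, c = e+2
lemma multinom_step (j e : ℕ) :
    ((2*j+e+2).choose j : ℤ) * ((j+e+2).choose (e+2) : ℤ) * (e+2) * (e+1)
    = ((2*j+e+2).choose (j+1) : ℤ) * ((j+e+1).choose e : ℤ) * ((j+1) * (j+1)) := by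
  have s1 : (j+e+2).choose (e+2) = (j+e+2).choose j := by
    have h := Nat.choose_symm (show j ≤ j+e+2 by omega)
    simpa [show j+e+2-j = e+2 by omega] using h
  have s2 : (j+e+1).choose e = (j+e+1).choose (j+1) := by
    have h := Nat.choose_symm (show j+1 ≤ j+e+1 by omega)
    simpa [show j+e+1-(j+1) = e by omega] using h
  rw [s1, s2]
  have e1 : ((2*j+e+2).choose (j+1) : ℤ) * (j+1) = ((2*j+e+2).choose j : ℤ) * (j+e+2) := by
    have h := Nat.choose_succ_right_eq (2*j+e+2) j
    rw [show (2*j+e+2) - j = j+e+2 by omega] at h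
    exact_mod_cast congrArg (Nat.cast : ℕ → ℤ) h
  have e2 : ((j+e+1).choose (j+1) : ℤ) * (j+1) = ((j+e+1).choose j : ℤ) * (e+1) := by
    have h := Nat.choose_succ_right_eq (j+e+1) j
    rw [show (j+e+1) - j = e+1 by omega] at h
    exact_mod_cast congrArg (Nat.cast : ℕ → ℤ) h
  have e3 : ((j+e+2) : ℤ) * ((j+e+1).choose j : ℤ) = ((j+e+2).choose (j+1) : ℤ) * (j+1) := by
    have h := Nat.add_one_mul_choose_eq (j+e+1) j
    exact_mod_cast congrArg (Nat.cast : ℕ → ℤ) h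
  have e4 : ((j+e+2).choose (j+1) : ℤ) * (j+1) = ((j+e+2).choose j : ℤ) * (e+2) := by
    have h := Nat.choose_succ_right_eq (j+e+2) j
    rw [show (j+e+2) - j = e+2 by omega] at h
    exact_mod_cast congrArg (Nat.cast : ℕ → ℤ) h
  calc ((2*j+e+2).choose j : ℤ) * ((j+e+2).choose j : ℤ) * (e+2) * (e+1)
      = (((2*j+e+2).choose j : ℤ) * ((e:ℤ)+1)) * (((j+e+2).choose j : ℤ) * ((e:ℤ)+2)) := by ring
    _ = (((2*j+e+2).choose j : ℤ) * ((e:ℤ)+1)) * (((j+e+2).choose (j+1) : ℤ) * ((j:ℤ)+1)) := by rw [e4]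
    _ = (((2*j+e+2).choose j : ℤ) * ((e:ℤ)+1)) * (((j+e+2) : ℤ) * ((j+e+1).choose j : ℤ)) := by rw [e3]
    _ = (((2*j+e+2).choose j : ℤ) * ((j:ℤ)+(e:ℤ)+2)) * (((j+e+1).choose j : ℤ) * ((e:ℤ)+1)) := by ring
    _ = (((2*j+e+2).choose (j+1) : ℤ) * ((j:ℤ)+1)) * (((j+e+1).choose (j+1) : ℤ) * ((j:ℤ)+1)) := by rw [e1, e2]
    _ = ((2*j+e+2).choose (j+1) : ℤ) * ((j+e+1).choose (j+1) : ℤ) * (((j:ℤ)+1) * ((j:ℤ)+1)) := by ring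

-- the value carried by B's running coefficient when iteration j starts
def Pcoef (M N j : ℕ) : Int :=
  (M.choose (M - N) : ℤ) * (N.choose j : ℤ) * ((N - j).choose (N - 2*j) : ℤ)

-- A's inner three-factor product at iteration j equals the running coefficient
lemma innerP (M N j : ℕ) (hMN : N ≤ M) (hj : 2*j ≤ N) :
    1 * combin (M:ℤ) ((M:ℤ) - (N:ℤ)) * combin ((M:ℤ) - ((M:ℤ) - (N:ℤ))) (j:ℤ)
      * combin ((M:ℤ) - ((M:ℤ) - (N:ℤ)) - (j:ℤ)) ((N:ℤ) - 2*(j:ℤ))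
    = Pcoef M N j := by
  have c4 : (N:ℤ) - 2*(j:ℤ) = ((N - 2*j : ℕ) : ℤ) := by omega
  have c1 : (M:ℤ) - (N:ℤ) = ((M - N : ℕ) : ℤ) := by omega
  have c2 : (M:ℤ) - ((M - N : ℕ) : ℤ) = ((N : ℕ) : ℤ) := by omega
  have c3 : ((N : ℕ) : ℤ) - (j:ℤ) = ((N - j : ℕ) : ℤ) := by omega
  rw [c4, c1, c2, c3]
  rw [combin_eq M (M - N), combin_eq N j, combin_eq (N - j) (N - 2*j)]
  unfold Pcoef
  ring

-- B's coefficient update is the exact recurrence step (while another iteration remains)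
lemma pstep (M N j : ℕ) (hj : 2*(j+1) ≤ N) :
    PySem.Int.floordiv (Pcoef M N j * ((N:ℤ) - 2*(j:ℤ)) * (((N:ℤ) - 2*(j:ℤ)) - 1))
      (((j:ℤ) + 1) * ((j:ℤ) + 1))
    = Pcoef M N (j+1) := by
  obtain ⟨e, he⟩ : ∃ e, N = 2*j + e + 2 := ⟨N - 2*j - 2, by omega⟩
  subst he
  have hc : ((2*j+e+2 : ℕ):ℤ) - 2*(j:ℤ) = ((e:ℕ):ℤ) + 2 := by push_cast; ring
  have key : Pcoef M (2*j+e+2) j * (((2*j+e+2 : ℕ):ℤ) - 2*(j:ℤ)) * ((((2*j+e+2 : ℕ):ℤ) - 2*(j:ℤ)) - 1)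
      = Pcoef M (2*j+e+2) (j+1) * (((j:ℤ) + 1) * ((j:ℤ) + 1)) := by
    unfold Pcoef
    rw [hc]
    rw [show (2*j+e+2) - j = j+e+2 by omega, show (2*j+e+2) - 2*j = e+2 by omega,
        show (2*j+e+2) - (j+1) = j+e+1 by omega, show (2*j+e+2) - 2*(j+1) = e by omega]
    have h := multinom_step j e
    calc (M.choose (M - (2*j+e+2)) : ℤ) * ((2*j+e+2).choose j : ℤ) * ((j+e+2).choose (e+2) : ℤ) * (((e:ℤ))+2) * ((((e:ℤ))+2) - 1)
        = (M.choose (M - (2*j+e+2)) : ℤ) * (((2*j+e+2).choose j : ℤ) * ((j+e+2).choose (e+2) : ℤ) * (((e:ℤ))+2) * (((e:ℤ))+1)) := by ring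
      _ = (M.choose (M - (2*j+e+2)) : ℤ) * (((2*j+e+2).choose (j+1) : ℤ) * ((j+e+1).choose e : ℤ) * (((j:ℤ)+1) * ((j:ℤ)+1))) := by
            rw [h]
      _ = (M.choose (M - (2*j+e+2)) : ℤ) * ((2*j+e+2).choose (j+1) : ℤ) * ((j+e+1).choose e : ℤ) * (((j:ℤ) + 1) * ((j:ℤ) + 1)) := by ring
  rw [key, floordiv_mul_cancel _ _ (by positivity)]

-- B's main loop (first component) equals A's main loop, given the running-coefficient invariant
lemma loop_eq (M N : ℕ) (hMN : N ≤ M) : ∀ (t j : ℕ), j + t = N / 2 + 1 → ∀ (x : Int),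
    ((PySem.List.pyRange (j : ℤ) (((N / 2 : ℕ) : ℤ) + 1) 1).foldl
      (fun (s : Int × Int) b =>
        let c := (N : ℤ) - 2 * b
        (s.1 + s.2 * 2 ^ c.toNat,
         PySem.Int.floordiv (s.2 * c * (c - 1)) ((b + 1) * (b + 1)))) (x, Pcoef M N j)).1
    = (PySem.List.pyRange (j : ℤ) (((N / 2 : ℕ) : ℤ) + 1) 1).foldl
      (fun x b =>
        let c := (N : ℤ) - 2 * b
        let st := [(M : ℤ) - (N : ℤ), b, c].foldl
          (fun (s : Int × Int) i => (s.1 - i, s.2 * combin s.1 i)) ((M : ℤ), 1)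
        x + st.2 * 2 ^ c.toNat) x := by
  intro t
  induction t with
  | zero =>
    intro j hj x
    rw [PySem.List.pyRange_one_eq_nil (by omega)]
    simp
  | succ s ih =>
    intro j hj x
    have hjle : j ≤ N / 2 := by omega
    have h2j : 2*j ≤ N := by omega
    rw [PySem.List.pyRange_one_cons (by omega : (j:ℤ) < ((N / 2 : ℕ) : ℤ) + 1)]
    simp only [List.foldl_cons, List.foldl_nil]
    rw [innerP M N j hMN h2j]
    cases s with
    | zero =>
      rw [PySem.List.pyRange_one_eq_nil (by omega : ((N / 2 : ℕ) : ℤ) + 1 ≤ (j:ℤ) + 1)]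
      simp
    | succ s' =>
      have hnext : 2*(j+1) ≤ N := by omega
      rw [pstep M N j hnext]
      have hcast : (j:ℤ) + 1 = ((j+1 : ℕ) : ℤ) := by push_cast; ring
      rw [hcast]
      exact ih (j+1) (by omega) _

-- ===== VERDICT (by name: the statement is the Claim_ definition above) =====
theorem f_spec : Claim_equal_f := by
  intro m n _
  unfold Spec_f f f_alt
  by_cases hlt : m < n
  · simp [hlt]
  · simp only [if_neg hlt]
    by_cases hn : n < 0
    · have hhi : PySem.Int.floordiv n 2 + 1 ≤ 0 := by
        have := (PySem.Int.floordiv_lt_iff_lt_mul (a := n) (b := 2) (q := 0) (by omega)).2 (by omega)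
        omega
      rw [PySem.List.pyRange_one_eq_nil hhi, PySem.List.pyRange_one_eq_nil (by omega : n ≤ 0)]
      simp
    · obtain ⟨N, hN⟩ : ∃ N : ℕ, n = (N : ℤ) := ⟨n.toNat, by omega⟩
      obtain ⟨M, hM⟩ : ∃ M : ℕ, m = (M : ℤ) := ⟨m.toNat, by omega⟩
      subst hN hM
      have hMN : N ≤ M := by exact_mod_cast not_lt.mp hlt
      have hfd : PySem.Int.floordiv (N:ℤ) 2 = ((N / 2 : ℕ) : ℤ) := by
        exact_mod_cast PySem.Int.floordiv_natCast N 2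
      rw [hfd]
      have hinit : (PySem.List.pyRange 0 (N:ℤ) 1).foldl
          (fun p i => PySem.Int.floordiv (p * ((M:ℤ) - i)) (i + 1)) 1
          = Pcoef M N 0 := by
        have h0 := init_eq M N hMN N 0 (by omega)
        simp only [Nat.choose_zero_right, Nat.cast_one, Nat.cast_zero] at h0
        unfold Pcoef
        simp only [Nat.choose_zero_right, Nat.sub_zero, Nat.mul_zero, Nat.choose_self,
          Nat.cast_one, mul_one]
        rw [Nat.choose_symm hMN]
        exact h0
      rw [hinit]
      have h := loop_eq M N hMN (N / 2 + 1) 0 (by omega) 0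
      simp only [Nat.cast_zero] at h
      rw [← h]
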